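-- pv_equiv track=rewrite | github.com/fugro/AutoTimeLiner | AutoTimeLiner/AutoTimeLiner.py | get_julian_list
-- ===== SOURCE A (Python) =====
-- def get_julian_list(HORZ_START_PIXEL, HORZ_STOP_PIXEL,JDAY):
--     COUNT = JDAY[1] - JDAY[0] + 1
--     horizontal_pixels = range(HORZ_START_PIXEL, HORZ_STOP_PIXEL)
--     julian_day = [h % COUNT for h in horizontal_pixels]
--     julian_day.sort()
--
--     julian_day_to_h_pixel_map = {}
--
--     for h_pixel, j_day in zip(range(HORZ_START_PIXEL, HORZ_STOP_PIXEL+1), julian_day):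
--         julian_day_to_h_pixel_map[j_day+JDAY[0]] = h_pixel
--
--     return julian_day_to_h_pixel_map
-- ===== SOURCE B (Python) =====
-- def get_julian_list(HORZ_START_PIXEL, HORZ_STOP_PIXEL, JDAY):
--     COUNT = JDAY[1] - JDAY[0] + 1
--     counts = {}
--     for h in range(HORZ_START_PIXEL, HORZ_STOP_PIXEL):
--         r = h % COUNT
--         counts[r] = counts.get(r, 0) + 1
--     result = {}
--     pixel = HORZ_START_PIXEL
--     for day in sorted(counts):
--         pixel += counts[day]
--         result[day + JDAY[0]] = pixel - 1
--     return result
-- ===== Notes on version B (the rewrite author's own statement) =====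
-- stated objective: alternative
-- what changed: B never sorts the full residue list: it tallies residues in one pass into a counts dict, sorts only the distinct residues, and assigns each its last pixel index from a running cumulative count; Pre_ excludes only inputs where A raises (JDAY shorter than 2, or zero day count with a nonempty pixel range).
-- outside the precondition, e.g. on get_julian_list(0, 5, [3]): A raises IndexError, B raises IndexError; on get_julian_list(0, 5, [3, 2]): A raises ZeroDivisionError, B raises ZeroDivisionError
import Mathlib
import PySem

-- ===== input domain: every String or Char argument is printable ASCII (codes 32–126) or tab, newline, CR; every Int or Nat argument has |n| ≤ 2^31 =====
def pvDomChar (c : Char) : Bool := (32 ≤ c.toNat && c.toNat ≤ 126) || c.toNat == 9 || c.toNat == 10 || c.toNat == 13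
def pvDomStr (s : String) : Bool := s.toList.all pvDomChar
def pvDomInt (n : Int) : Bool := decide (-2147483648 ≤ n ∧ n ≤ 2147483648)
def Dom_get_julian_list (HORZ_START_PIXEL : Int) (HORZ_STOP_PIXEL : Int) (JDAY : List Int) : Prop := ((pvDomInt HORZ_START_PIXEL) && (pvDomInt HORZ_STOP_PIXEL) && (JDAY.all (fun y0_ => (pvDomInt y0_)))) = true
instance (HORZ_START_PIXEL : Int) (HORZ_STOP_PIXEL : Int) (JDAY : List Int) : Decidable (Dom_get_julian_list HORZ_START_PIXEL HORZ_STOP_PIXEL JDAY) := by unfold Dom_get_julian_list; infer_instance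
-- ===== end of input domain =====

-- B avoids sorting the full residue list: it tallies residues into a counts dict in
-- one pass, sorts only the distinct residues, and assigns each its last pixel index
-- from a running cumulative count.

-- tail-recursive zip (exactly List.zip, proved below; core List.zip overflows the
-- interpreter stack on large inputs)
def pyZipGo {α β : Type} : List α → List β → List (α × β) → List (α × β)
  | x :: xs, y :: ys, acc => pyZipGo xs ys ((x, y) :: acc)
  | _, _, acc => acc.reverse
def pyZip {α β : Type} (l1 : List α) (l2 : List β) : List (α × β) := pyZipGo l1 l2 []

-- ===== PORT A =====
-- Pre_ guarantees JDAY[0]/JDAY[1] exist and COUNT ≠ 0 wherever '%' runs, so pyGetD's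
-- defaults are never observed inside Pre_.
def get_julian_list (HORZ_START_PIXEL : Int) (HORZ_STOP_PIXEL : Int) (JDAY : List Int) : List (Int × Int) :=
  let J0 := PySem.List.pyGetD JDAY 0 0
  let COUNT := PySem.List.pyGetD JDAY 1 0 - J0 + 1
  -- julian_day.sort(): Python's stable list sort of ints, ported as the standard
  -- library's stable mergeSort (proved below to equal PySem.List.sorted)
  let julian_day := ((PySem.List.pyRange HORZ_START_PIXEL HORZ_STOP_PIXEL).map
      (fun h => PySem.Int.mod h COUNT)).mergeSort (fun a b => a ≤ b)
  let d := (pyZip (PySem.List.pyRange HORZ_START_PIXEL (HORZ_STOP_PIXEL + 1)) julian_day).foldl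
      (fun d p => d.insert (p.2 + J0) p.1) (PySem.Dict.empty : PySem.Dict Int Int)
  d.items

-- ===== PORT B =====
def get_julian_list_alt (HORZ_START_PIXEL : Int) (HORZ_STOP_PIXEL : Int) (JDAY : List Int) : List (Int × Int) :=
  let J0 := PySem.List.pyGetD JDAY 0 0
  let COUNT := PySem.List.pyGetD JDAY 1 0 - J0 + 1
  -- counts[r] = counts.get(r, 0) + 1 over the pixel range
  let counts := (PySem.List.pyRange HORZ_START_PIXEL HORZ_STOP_PIXEL).foldl
      (fun (d : PySem.Dict Int Int) h =>
        let r := PySem.Int.mod h COUNT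
        d.insert r (d.getD r 0 + 1)) (PySem.Dict.empty : PySem.Dict Int Int)
  -- for day in sorted(counts): pixel += counts[day]; result[day + JDAY[0]] = pixel - 1
  let res := (counts.keys.mergeSort (fun a b => a ≤ b)).foldl
      (fun (a : PySem.Dict Int Int × Int) day =>
        (a.1.insert (day + J0) (a.2 + counts.getD day 0 - 1), a.2 + counts.getD day 0))
      ((PySem.Dict.empty : PySem.Dict Int Int), HORZ_START_PIXEL)
  res.1.items

-- ===== PRECONDITION & SPEC =====
-- Pre_ excludes exactly the inputs where A raises: JDAY shorter than 2 (IndexError on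
-- JDAY[1]) and COUNT = 0 with a nonempty pixel range (ZeroDivisionError in h % COUNT).
def Pre_get_julian_list (HORZ_START_PIXEL : Int) (HORZ_STOP_PIXEL : Int) (JDAY : List Int) : Prop :=
  2 ≤ JDAY.length ∧
  (PySem.List.pyGetD JDAY 1 0 - PySem.List.pyGetD JDAY 0 0 + 1 ≠ 0 ∨ HORZ_STOP_PIXEL ≤ HORZ_START_PIXEL)
instance (HORZ_START_PIXEL : Int) (HORZ_STOP_PIXEL : Int) (JDAY : List Int) : Decidable (Pre_get_julian_list HORZ_START_PIXEL HORZ_STOP_PIXEL JDAY) := by unfold Pre_get_julian_list; infer_instance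
def pvWitness_get_julian_list : Int × Int × List Int := (0, 5, [3, 5])

def Spec_get_julian_list (HORZ_START_PIXEL : Int) (HORZ_STOP_PIXEL : Int) (JDAY : List Int) (out : List (Int × Int)) : Prop := out = get_julian_list_alt HORZ_START_PIXEL HORZ_STOP_PIXEL JDAY
instance (HORZ_START_PIXEL : Int) (HORZ_STOP_PIXEL : Int) (JDAY : List Int) (out : List (Int × Int)) : Decidable (Spec_get_julian_list HORZ_START_PIXEL HORZ_STOP_PIXEL JDAY out) := by unfold Spec_get_julian_list; infer_instance

-- ===== CLAIM (what is proved, stated in full; the proofs are below) =====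
def Claim_equal_get_julian_list : Prop := ∀ (HORZ_START_PIXEL : Int) (HORZ_STOP_PIXEL : Int) (JDAY : List Int), Dom_get_julian_list HORZ_START_PIXEL HORZ_STOP_PIXEL JDAY → Pre_get_julian_list HORZ_START_PIXEL HORZ_STOP_PIXEL JDAY → Spec_get_julian_list HORZ_START_PIXEL HORZ_STOP_PIXEL JDAY (get_julian_list HORZ_START_PIXEL HORZ_STOP_PIXEL JDAY)

-- ===== LEMMAS AND PROOFS =====

theorem pyZipGo_eq {α β : Type} : ∀ (l1 : List α) (l2 : List β) (acc : List (α × β)),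
    pyZipGo l1 l2 acc = acc.reverse ++ l1.zip l2
  | [], [], acc => by simp [pyZipGo]
  | [], _ :: _, acc => by simp [pyZipGo]
  | _ :: _, [], acc => by simp [pyZipGo]
  | x :: xs, y :: ys, acc => by
    simp [pyZipGo, pyZipGo_eq xs ys ((x, y) :: acc)]

theorem pyZip_eq {α β : Type} (l1 : List α) (l2 : List β) : pyZip l1 l2 = l1.zip l2 := by
  simp [pyZip, pyZipGo_eq]

theorem mergeSort_eq_sorted (xs : List Int) :
    xs.mergeSort (fun a b => a ≤ b) = PySem.List.sorted xs (fun x => x) false := by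
  apply PySem.List.eq_of_perm_of_pairwise_le_of_injective (fun x => x) (fun a b h => h)
  · exact (xs.mergeSort_perm _).trans (PySem.List.sorted_perm xs _ _).symm
  · have := List.pairwise_mergeSort (le := fun a b : Int => decide (a ≤ b))
      (by intro a b c hab hbc; simp at *; omega) (by intro a b; simp; omega) xs
    exact this.imp (by simp)
  · exact PySem.List.sorted_pairwise _ _

-- count of an element in a flatten of replicate blocks over distinct block labels
theorem count_flat_rep (f : Int → Nat) : ∀ (rs : List Int) (a : Int), rs.Nodup →
    ((rs.map (fun r => List.replicate (f r) r)).flatten).count a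
      = if a ∈ rs then f a else 0 := by
  intro rs
  induction rs with
  | nil => intro a _; simp
  | cons r rs ih =>
    intro a hnd
    simp only [List.map_cons, List.flatten_cons, List.count_append, List.count_replicate]
    rw [ih a (List.nodup_cons.mp hnd).2]
    by_cases hEq : a = r
    · subst hEq
      have : a ∉ rs := (List.nodup_cons.mp hnd).1
      simp [this]
    · simp [hEq, Ne.symm hEq, List.mem_cons]

-- fold of inserts over a constant-key block
theorem rep_fold (J0 r : Int) : ∀ (c : Nat) (h : Int) (d : PySem.Dict Int Int), 1 ≤ c →
    (((PySem.List.pyRange h (h + (c : Int))).zip (List.replicate c r)).foldl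
        (fun d q => d.insert (q.2 + J0) q.1) d)
      = d.insert (r + J0) (h + (c : Int) - 1) := by
  intro c
  induction c with
  | zero => intro h d hc; omega
  | succ c ih =>
    intro h d _
    push_cast
    rw [PySem.List.pyRange_one_cons (by omega : h < h + ((c : Int) + 1))]
    simp only [List.replicate_succ, List.zip_cons_cons, List.foldl_cons]
    rcases Nat.eq_zero_or_pos c with hc | hc
    · subst hc; simp
    · have : h + ((c : Int) + 1) = (h + 1) + (c : Int) := by ring
      rw [this, ih (h + 1) _ hc, PySem.Dict.insert_insert_self]

-- A's insert loop over zip(range, flatten of blocks) equals the canonical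
-- cumulative-count list fold
theorem blocks_fold (J0 : Int) : ∀ (bs : List (Int × Nat)) (b h : Int)
    (d : PySem.Dict Int Int) (acc : List (Int × Int)),
    d.items = acc →
    (∀ p ∈ bs, 1 ≤ p.2) →
    (bs.map (fun p => p.1 + J0)).Nodup →
    (∀ p ∈ bs, (p.1 + J0) ∉ acc.map Prod.fst) →
    ((bs.map (fun p => (p.2 : Int))).sum ≤ b - h) →
    (((PySem.List.pyRange h b).zip
        ((bs.map (fun p => List.replicate p.2 p.1)).flatten)).foldl
        (fun d q => d.insert (q.2 + J0) q.1) d).items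
      = (bs.foldl (fun (a : List (Int × Int) × Int) p =>
            (a.1 ++ [(p.1 + J0, a.2 + (p.2 : Int) - 1)], a.2 + (p.2 : Int))) (acc, h)).1 := by
  intro bs
  induction bs with
  | nil => intro b h d acc hitems _ _ _ _; simpa using hitems
  | cons p bs ih =>
    intro b h d acc hitems hpos hnd hfresh hsum
    simp only [List.map_cons, List.flatten_cons, List.sum_cons, List.foldl_cons] at *
    have hc1 : 1 ≤ p.2 := hpos p (by simp)
    have hble : h + (p.2 : Int) ≤ b := by
      have : 0 ≤ ((bs.map (fun p => (p.2 : Int))).sum) := by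
        apply List.sum_nonneg; intro x hx
        simp only [List.mem_map] at hx; obtain ⟨q, _, rfl⟩ := hx; positivity
      omega
    rw [PySem.List.pyRange_one_append h (h + (p.2 : Int)) b (by omega) hble]
    rw [List.zip_append (by rw [PySem.List.length_pyRange_one, List.length_replicate]; omega)]
    rw [List.foldl_append]
    rw [rep_fold J0 p.1 p.2 h d hc1]
    have hcf : d.contains (p.1 + J0) = false := by
      rw [PySem.Dict.contains_eq_decide_mem_keys]
      have hk : d.keys = acc.map Prod.fst := by
        show d.items.map Prod.fst = acc.map Prod.fst
        rw [hitems]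
      rw [hk]
      simpa using hfresh p (by simp)
    have hcont : (d.insert (p.1 + J0) (h + (p.2 : Int) - 1)).items
        = acc ++ [(p.1 + J0, h + (p.2 : Int) - 1)] := by
      rw [PySem.Dict.items_insert_of_not_contains d _ hcf, hitems]
    rw [ih b (h + (p.2 : Int)) _ _ hcont (fun q hq => hpos q (by simp [hq])) hnd.of_cons ?_ (by omega)]
    intro q hq
    simp only [List.map_append, List.mem_append, List.map_cons, List.map_nil, not_or]
    refine ⟨hfresh q (by simp [hq]), ?_⟩
    have hhead := (List.nodup_cons.mp hnd).1
    simp only [List.mem_singleton]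
    intro hEq
    exact hhead (by rw [← hEq]; exact List.mem_map_of_mem hq)

-- B's dict-building loop with a running pixel equals the same canonical list fold
theorem b_dict_fold (J0 : Int) (c : Int → Int) (cN : Int → Nat) :
    ∀ (rs : List Int) (d : PySem.Dict Int Int) (acc : List (Int × Int)) (pix : Int),
    d.items = acc →
    (∀ r ∈ rs, c r = (cN r : Int)) →
    (rs.map (· + J0)).Nodup →
    (∀ r ∈ rs, (r + J0) ∉ acc.map Prod.fst) →
    ((rs.foldl (fun (a : PySem.Dict Int Int × Int) day =>
        (a.1.insert (day + J0) (a.2 + c day - 1), a.2 + c day)) (d, pix)).1).items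
    = ((rs.map (fun r => (r, cN r))).foldl
        (fun (a : List (Int × Int) × Int) p =>
          (a.1 ++ [(p.1 + J0, a.2 + (p.2 : Int) - 1)], a.2 + (p.2 : Int))) (acc, pix)).1 := by
  intro rs
  induction rs with
  | nil => intro d acc pix hitems _ _ _; simpa using hitems
  | cons r rs ih =>
    intro d acc pix hitems hc hnd hfresh
    simp only [List.map_cons, List.foldl_cons]
    have hcf : d.contains (r + J0) = false := by
      rw [PySem.Dict.contains_eq_decide_mem_keys]
      have hk : d.keys = acc.map Prod.fst := by
        show d.items.map Prod.fst = acc.map Prod.fst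
        rw [hitems]
      rw [hk]
      simpa using hfresh r (by simp)
    have hcont : (d.insert (r + J0) (pix + c r - 1)).items
        = acc ++ [(r + J0, pix + c r - 1)] := by
      rw [PySem.Dict.items_insert_of_not_contains d _ hcf, hitems]
    rw [hc r (by simp)] at hcont ⊢
    rw [ih _ _ _ hcont (fun r' hr' => hc r' (by simp [hr'])) hnd.of_cons ?_]
    intro q hq
    simp only [List.map_append, List.mem_append, List.map_cons, List.map_nil, not_or]
    refine ⟨hfresh q (by simp [hq]), ?_⟩
    have hhead := (List.nodup_cons.mp hnd).1
    simp only [List.mem_singleton]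
    intro hEq
    have hqr : q = r := by omega
    exact hhead (by simpa using hqr ▸ hq)

-- sorted(xs) is the flatten of replicate-count blocks over sorted(set(xs))
theorem sorted_blocks (L : List Int) :
    PySem.List.sorted L (fun x => x) false
      = (((PySem.List.sorted (PySem.Set.ofList L) (fun x => x) false).map
          (fun r => List.replicate (L.count r) r)).flatten) := by
  set ks := PySem.List.sorted (PySem.Set.ofList L) (fun x => x) false with hks
  have hlt : ks.Pairwise (· < ·) := PySem.List.sorted_ofList_pairwise_lt L
  have hnd : ks.Nodup := hlt.imp (fun h => ne_of_lt h)
  have hmem : ∀ r, r ∈ ks ↔ r ∈ L := by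
    intro r
    rw [hks, PySem.List.mem_sorted, PySem.Set.mem_ofList]
  apply PySem.List.sorted_id_eq_of_perm_of_pairwise
  · -- permutation via counts
    rw [List.perm_iff_count]
    intro a
    rw [count_flat_rep _ ks a hnd]
    by_cases ha : a ∈ ks
    · simp [ha]
    · have : a ∉ L := fun h => ha ((hmem a).mpr h)
      simp [ha, List.count_eq_zero.mpr this]
  · -- pairwise ≤
    rw [List.pairwise_flatten]
    constructor
    · intro l hl
      simp only [List.mem_map] at hl
      obtain ⟨r, _, rfl⟩ := hl
      exact List.pairwise_replicate.mpr (Or.inr le_rfl)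
    · rw [List.pairwise_map]
      apply hlt.imp
      intro a b h x hx y hy
      have hxa := List.eq_of_mem_replicate hx
      have hyb := List.eq_of_mem_replicate hy
      omega

-- ===== the main equivalence =====
theorem main_equiv (s t : Int) (JDAY : List Int) :
    get_julian_list s t JDAY = get_julian_list_alt s t JDAY := by
  simp only [get_julian_list, get_julian_list_alt, pyZip_eq, mergeSort_eq_sorted]
  by_cases hst : t < s
  · rw [PySem.List.pyRange_one_eq_nil (by omega : t ≤ s)]
    have hse : PySem.List.sorted ([] : List Int) (fun x => x) false = [] := by
      simp [PySem.List.sorted_eq_nil_iff]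
    simp only [List.map_nil, List.foldl_nil, hse, List.zip_nil_right]
    rfl
  set J0 := PySem.List.pyGetD JDAY 0 0 with hJ0
  set C := PySem.List.pyGetD JDAY 1 0 - J0 + 1 with hC
  set L := (PySem.List.pyRange s t).map (fun h => PySem.Int.mod h C) with hL
  -- B's tally dict is Counter(L)
  have hcounter : (PySem.List.pyRange s t).foldl
      (fun (d : PySem.Dict Int Int) h =>
        let r := PySem.Int.mod h C
        d.insert r (d.getD r 0 + 1)) (PySem.Dict.empty : PySem.Dict Int Int)
      = PySem.Dict.counter L := by
    rw [← PySem.Dict.foldl_insert_getD_add_one_eq_counter L, hL, List.foldl_map]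
  rw [hcounter]
  set ks := PySem.List.sorted (PySem.Dict.counter L).keys (fun x => x) false with hksd
  have hkeys : (PySem.Dict.counter L).keys = PySem.Set.ofList L := PySem.Dict.keys_counter L
  have hks : ks = PySem.List.sorted (PySem.Set.ofList L) (fun x => x) false := by
    rw [hksd, hkeys]
  have hlt : ks.Pairwise (· < ·) := by
    rw [hks]; exact PySem.List.sorted_ofList_pairwise_lt L
  have hnd : ks.Nodup := hlt.imp (fun h => ne_of_lt h)
  have hmem : ∀ r, r ∈ ks ↔ r ∈ L := by
    intro r
    rw [hks, PySem.List.mem_sorted, PySem.Set.mem_ofList]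
  have hndk : (ks.map (· + J0)).Nodup := hnd.map (fun a b h => by omega)
  -- B side → canonical fold
  have hB := b_dict_fold J0 (fun day => (PySem.Dict.counter L).getD day 0)
      (fun r => L.count r) ks (PySem.Dict.empty : PySem.Dict Int Int) [] s rfl
      (fun r _ => PySem.Dict.getD_counter L r) hndk (fun r _ => by simp)
  -- A side → same canonical fold
  set bs := ks.map (fun r => (r, L.count r)) with hbs
  have hflat : (bs.map (fun p => List.replicate p.2 p.1)).flatten
      = PySem.List.sorted L (fun x => x) false := by
    rw [hbs, List.map_map]
    rw [sorted_blocks L, ← hks]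
    rfl
  have hsum : ((bs.map (fun p => (p.2 : Int))).sum ≤ (t + 1) - s) := by
    have h1 : (bs.map (fun p => (p.2 : Int))).sum
        = (((bs.map (fun p => List.replicate p.2 p.1)).flatten).length : Int) := by
      rw [List.length_flatten, hbs]
      simp [List.map_map, Function.comp_def, List.length_replicate, Nat.cast_list_sum]
    rw [h1, hflat, (PySem.List.sorted_perm L (fun x => x) false).length_eq]
    rw [hL, List.length_map, PySem.List.length_pyRange_one]
    omega
  have hA := blocks_fold J0 bs (t + 1) s (PySem.Dict.empty : PySem.Dict Int Int) [] rfl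
      (fun p hp => by
        rw [hbs] at hp
        simp only [List.mem_map] at hp
        obtain ⟨r, hr, rfl⟩ := hp
        exact List.count_pos_iff.mpr ((hmem r).mp hr))
      (by rw [hbs, List.map_map]; simpa [Function.comp_def] using hndk)
      (fun p _ => by simp)
      hsum
  rw [← hflat] at *
  rw [hA, hB, hbs]

-- ===== VERDICT (by name: the statement is the Claim_ definition above) =====
theorem get_julian_list_spec : Claim_equal_get_julian_list := by
  intro s t JDAY _ _
  unfold Spec_get_julian_list
  exact main_equiv s t JDAY
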